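-- pv_equiv track=rewrite | github.com/pypi-data/pypi-mirror-401 | packages/astronomo/astronomo-0.16.0.tar.gz/astronomo-0.16.0/src/astronomo/identities.py | extract_cert_from_pem
-- ===== SOURCE A (Python) =====
-- def extract_cert_from_pem(pem_content: str) -> str:
--     """Extract the certificate section from a combined PEM file.
--
--     Args:
--         pem_content: Full content of the PEM file
--
--     Returns:
--         The certificate section including BEGIN/END markers
--     """
--     lines = pem_content.split("\n")
--     cert_lines = []
--     in_cert = False
--
--     for line in lines:
--         if "-----BEGIN CERTIFICATE-----" in line:
--             in_cert = True
--         if in_cert: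
--             cert_lines.append(line)
--         if in_cert and "-----END CERTIFICATE-----" in line:
--             break
--
--     return "\n".join(cert_lines)
-- ===== SOURCE B (Python) =====
-- def extract_cert_from_pem(pem_content: str) -> str:
--     """Extract the certificate section from a combined PEM file."""
--     begin_marker = "-----BEGIN CERTIFICATE-----"
--     end_marker = "-----END CERTIFICATE-----"
--     lines = pem_content.split("\n")
--     start = next((i for i, line in enumerate(lines) if begin_marker in line), None)
--     if start is None:
--         return ""
--     tail = lines[start:]
--     stop = next((i for i, line in enumerate(tail) if end_marker in line), len(tail) - 1)
--     return "\n".join(tail[:stop + 1])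
-- ===== Notes on version B (the rewrite author's own statement) =====
-- stated objective: idiomatic
-- what changed: Replaces the stateful line-by-line loop (in_cert flag, accumulator list, break) with index arithmetic: find the first line containing the BEGIN marker, find the first END line at or after it, and slice-and-join that block.
import Mathlib
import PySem

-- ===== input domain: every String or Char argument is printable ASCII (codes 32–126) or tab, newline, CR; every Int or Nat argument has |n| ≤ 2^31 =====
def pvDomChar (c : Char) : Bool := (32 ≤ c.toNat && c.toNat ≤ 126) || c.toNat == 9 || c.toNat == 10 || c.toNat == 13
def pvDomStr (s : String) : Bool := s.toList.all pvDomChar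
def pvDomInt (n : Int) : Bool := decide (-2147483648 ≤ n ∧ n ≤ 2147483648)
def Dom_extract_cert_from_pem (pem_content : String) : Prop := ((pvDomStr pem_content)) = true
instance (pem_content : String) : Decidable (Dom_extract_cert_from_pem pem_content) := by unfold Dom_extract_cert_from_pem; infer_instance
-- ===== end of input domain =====

-- B replaces A's stateful line loop (in_cert flag + accumulator + break) with index search and
-- list slicing; objective: idiomatic (same O(n) cost). Return values proved equal on all inputs.

def pvBeginMarker : String := "-----BEGIN CERTIFICATE-----"
def pvEndMarker : String := "-----END CERTIFICATE-----"

-- ===== PORT A =====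
-- the for-loop over lines with state (cert_lines, in_cert) and break
def pvLoopA : List String → List String → Bool → List String
  | [], certLines, _ => certLines
  | line :: rest, certLines, inCert =>
    let inCert' := if PySem.Str.isIn pvBeginMarker line then true else inCert
    let certLines' := if inCert' then certLines ++ [line] else certLines
    if inCert' && PySem.Str.isIn pvEndMarker line then certLines'
    else pvLoopA rest certLines' inCert'

def extract_cert_from_pem (pem_content : String) : String :=
  PySem.Str.join "\n" (pvLoopA ((PySem.Str.split? pem_content "\n").getD []) [] false)

-- ===== PORT B =====
def extract_cert_from_pem_alt (pem_content : String) : String :=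
  let lines := (PySem.Str.split? pem_content "\n").getD []
  -- next((i for i, line in enumerate(lines) if begin_marker in line), None)
  match lines.findIdx? (fun line => PySem.Str.isIn pvBeginMarker line) with
  | none => ""
  | some start =>
    let tail := PySem.List.slice lines (some (start : Int)) none
    -- next((i for i, line in enumerate(tail) if end_marker in line), len(tail) - 1)
    let stop := (tail.findIdx? (fun line => PySem.Str.isIn pvEndMarker line)).getD (tail.length - 1)
    PySem.Str.join "\n" (PySem.List.slice tail none (some ((stop : Int) + 1)))

-- ===== PRECONDITION & SPEC =====
def Spec_extract_cert_from_pem (pem_content : String) (out : String) : Prop := out = extract_cert_from_pem_alt pem_content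
instance (pem_content : String) (out : String) : Decidable (Spec_extract_cert_from_pem pem_content out) := by unfold Spec_extract_cert_from_pem; infer_instance

-- ===== CLAIM (what is proved, stated in full; the proofs are below) =====
def Claim_equal_extract_cert_from_pem : Prop := ∀ (pem_content : String), Dom_extract_cert_from_pem pem_content → Spec_extract_cert_from_pem pem_content (extract_cert_from_pem pem_content)

-- ===== LEMMAS AND PROOFS =====

-- the in-cert phase of A's loop: collect lines up to and including the first END line
def pvTakeIncl : List String → List String
  | [] => []
  | line :: rest =>
    line :: (if PySem.Str.isIn pvEndMarker line then [] else pvTakeIncl rest)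

theorem pvLoopA_true (ls : List String) : ∀ acc, pvLoopA ls acc true = acc ++ pvTakeIncl ls := by
  induction ls with
  | nil => intro acc; simp [pvLoopA, pvTakeIncl]
  | cons l r ih =>
    intro acc
    by_cases h : PySem.Chars.isIn pvEndMarker.toList l.toList = true <;>
      simp [pvLoopA, pvTakeIncl, PySem.Str.isIn_eq, h, ih]

theorem pvTakeIncl_eq_take (ls : List String) :
    pvTakeIncl ls =
      ls.take ((((ls.findIdx? (fun line => PySem.Str.isIn pvEndMarker line)).map (· + 1)).getD ls.length)) := by
  induction ls with
  | nil => simp [pvTakeIncl]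
  | cons l r ih =>
    by_cases h : PySem.Chars.isIn pvEndMarker.toList l.toList = true
    · simp [pvTakeIncl, PySem.Str.isIn_eq, h, List.findIdx?_cons]
    · simp only [pvTakeIncl, PySem.Str.isIn_eq, h, if_false, List.findIdx?_cons,
        Bool.false_eq_true, ih]
      cases hf : r.findIdx? (fun line => PySem.Chars.isIn pvEndMarker.toList line.toList) with
      | none => simp
      | some i => simp

theorem pvLoopA_false (ls : List String) :
    pvLoopA ls [] false =
      match ls.findIdx? (fun line => PySem.Str.isIn pvBeginMarker line) with
      | none => []
      | some s => pvTakeIncl (ls.drop s) := by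
  induction ls with
  | nil => simp [pvLoopA]
  | cons l r ih =>
    by_cases h : PySem.Chars.isIn pvBeginMarker.toList l.toList = true
    · by_cases he : PySem.Chars.isIn pvEndMarker.toList l.toList = true <;>
        simp [pvLoopA, PySem.Str.isIn_eq, h, he, List.findIdx?_cons, pvTakeIncl, pvLoopA_true]
    · simp only [pvLoopA, PySem.Str.isIn_eq, h, List.findIdx?_cons, if_false,
        Bool.false_eq_true, Bool.false_and, ih]
      cases r.findIdx? (fun line => PySem.Chars.isIn pvBeginMarker.toList line.toList) <;>
        simp

-- A's loop equals B's find-and-slice computation, for any list of lines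
theorem pvMain (ls : List String) :
    PySem.Str.join "\n" (pvLoopA ls [] false) =
      (match ls.findIdx? (fun line => PySem.Str.isIn pvBeginMarker line) with
      | none => ""
      | some start =>
        PySem.Str.join "\n" (PySem.List.slice (PySem.List.slice ls (some (start : Int)) none) none
          (some ((((PySem.List.slice ls (some (start : Int)) none).findIdx?
              (fun line => PySem.Str.isIn pvEndMarker line)).getD
              ((PySem.List.slice ls (some (start : Int)) none).length - 1) : Nat) + 1)))) := by
  rw [pvLoopA_false]
  cases hb : ls.findIdx? (fun line => PySem.Str.isIn pvBeginMarker line) with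
  | none => rfl
  | some start =>
    dsimp only
    rw [PySem.List.slice_from_natCast, pvTakeIncl_eq_take]
    cases hf : (ls.drop start).findIdx? (fun line => PySem.Str.isIn pvEndMarker line) with
    | some i =>
      simp only [Option.map_some, Option.getD_some]
      rw [show ((i : Int) + 1) = (((i + 1 : Nat)) : Int) from by push_cast; ring,
        PySem.List.slice_to_natCast]
    | none =>
      simp only [Option.map_none, Option.getD_none]
      cases htail : ls.drop start with
      | nil => simp [PySem.List.slice]
      | cons t ts =>
        rw [show ((((t :: ts : List String).length - 1 : Nat) : Int) + 1)
            = (((t :: ts : List String).length : Nat) : Int) from by simp,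
          PySem.List.slice_to_natCast]

-- ===== VERDICT (by name: the statement is the Claim_ definition above) =====
theorem extract_cert_from_pem_spec : Claim_equal_extract_cert_from_pem := by
  intro pem _
  unfold Spec_extract_cert_from_pem extract_cert_from_pem extract_cert_from_pem_alt
  exact pvMain ((PySem.Str.split? pem "\n").getD [])
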